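-- pv_equiv track=rewrite | github.com/lekesiz/Sentry-AI | sentry_ai/agents/decision_engine.py | match_option
-- ===== SOURCE A (Python) =====
-- from typing import Optional, List
--
-- def match_option(target: str, options: List[str]) -> Optional[str]:
--     """
--     Find the best matching option for a target string.
--
--     Args:
--         target: Target string to match
--         options: List of available options
--
--     Returns:
--         Best matching option or None
--     """
--     target_lower = target.lower()
--
--     # Exact match
--     for option in options:
--         if option.lower() == target_lower:
--             return option
--
--     # Partial match
--     for option in options:
--         if target_lower in option.lower() or option.lower() in target_lower:
--             return option
--
--     return None
-- ===== SOURCE B (Python) =====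
-- from typing import Optional, List
--
-- def match_option(target: str, options: List[str]) -> Optional[str]:
--     """Single pass: return first exact (case-insensitive) match immediately;
--     remember the first partial match and fall back to it after the scan."""
--     target_lower = target.lower()
--     partial = None
--     for option in options:
--         ol = option.lower()
--         if ol == target_lower:
--             return option
--         if partial is None and (target_lower in ol or ol in target_lower):
--             partial = option
--     return partial
-- ===== Notes on version B (the rewrite author's own statement) =====
-- stated objective: alternative
-- what changed: Two sequential scans (exact pass, then partial pass) are replaced by one pass that returns an exact match immediately and carries the first partial match in an accumulator, returned only after the whole list is scanned.
import Mathlib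
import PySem

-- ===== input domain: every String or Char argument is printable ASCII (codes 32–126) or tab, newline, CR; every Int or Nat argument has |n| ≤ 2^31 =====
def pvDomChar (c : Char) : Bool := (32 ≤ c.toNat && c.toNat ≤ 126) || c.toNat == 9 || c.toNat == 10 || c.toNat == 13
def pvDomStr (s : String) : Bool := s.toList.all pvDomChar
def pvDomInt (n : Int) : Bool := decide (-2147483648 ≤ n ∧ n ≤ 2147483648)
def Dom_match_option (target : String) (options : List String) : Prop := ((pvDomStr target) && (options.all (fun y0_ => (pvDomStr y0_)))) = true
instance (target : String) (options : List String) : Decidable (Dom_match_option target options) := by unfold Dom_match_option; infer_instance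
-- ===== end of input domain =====

-- B is an alternative single-pass decomposition of A's two scans; same cost, return value proved equal.

-- ===== PORT A =====
-- A: first scan for an exact case-insensitive match, then a second scan for a partial match.
def match_option (target : String) (options : List String) : Option String :=
  let target_lower := PySem.Str.lower target
  match options.find? (fun option => PySem.Str.lower option == target_lower) with
  | some option => some option
  | none =>
    options.find? (fun option =>
      PySem.Str.isIn target_lower (PySem.Str.lower option) ||
      PySem.Str.isIn (PySem.Str.lower option) target_lower)

-- ===== PORT B =====
-- B: one pass; exact match returns immediately, the first partial match is kept in `part`.
def matchOptionAltGo (target_lower : String) : List String → Option String → Option String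
  | [], part => part
  | option :: rest, part =>
    let ol := PySem.Str.lower option
    if ol == target_lower then some option
    else
      matchOptionAltGo target_lower rest
        (if part.isNone && (PySem.Str.isIn target_lower ol || PySem.Str.isIn ol target_lower)
         then some option else part)

def match_option_alt (target : String) (options : List String) : Option String :=
  matchOptionAltGo (PySem.Str.lower target) options none

-- ===== PRECONDITION & SPEC =====
def Spec_match_option (target : String) (options : List String) (out : Option String) : Prop := out = match_option_alt target options
instance (target : String) (options : List String) (out : Option String) : Decidable (Spec_match_option target options out) := by unfold Spec_match_option; infer_instance

-- ===== CLAIM (what is proved, stated in full; the proofs are below) =====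
def Claim_equal_match_option : Prop := ∀ (target : String) (options : List String), Dom_match_option target options → Spec_match_option target options (match_option target options)

-- ===== LEMMAS AND PROOFS =====

lemma matchOptionAltGo_eq (tl : String) (opts : List String) (p : Option String) :
    matchOptionAltGo tl opts p =
      match opts.find? (fun o => PySem.Str.lower o == tl) with
      | some o => some o
      | none =>
        match p with
        | some q => some q
        | none => opts.find? (fun o =>
            PySem.Str.isIn tl (PySem.Str.lower o) || PySem.Str.isIn (PySem.Str.lower o) tl) := by
  induction opts generalizing p with
  | nil => cases p <;> simp [matchOptionAltGo]
  | cons o rest ih =>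
    by_cases hx : (PySem.Str.lower o == tl) = true
    · simp [matchOptionAltGo, hx]
    · have hx' : (PySem.Str.lower o == tl) = false := by simpa using hx
      simp only [matchOptionAltGo, List.find?_cons, hx', Bool.false_eq_true,
        if_false]
      rw [ih]
      cases p with
      | some q => rfl
      | none =>
        simp only [Option.isNone_none, Bool.true_and]
        cases hb : (PySem.Str.isIn tl (PySem.Str.lower o) || PySem.Str.isIn (PySem.Str.lower o) tl) with
        | true => rw [if_pos (by simpa [Bool.or_eq_true] using hb)]
        | false => rw [if_neg (by simpa [Bool.or_eq_true, not_or] using hb)]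

-- ===== VERDICT (by name: the statement is the Claim_ definition above) =====
theorem match_option_spec : Claim_equal_match_option := by
  intro target options _
  unfold Spec_match_option match_option match_option_alt
  rw [matchOptionAltGo_eq]
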